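-- pv_equiv track=rewrite | github.com/itsreallyryuu/DanzXploit | modules/nik.py | get_life_path
-- ===== SOURCE A (Python) =====
-- def get_life_path(tgl: int, bln: int, thn: int) -> str:
--     raw = f"{tgl:02d}{bln:02d}{thn:04d}"
--
--     def sum_digits(s: str) -> int:
--         return sum(int(c) for c in s)
--
--     # Jumlah awal
--     total = sum_digits(raw)
--
--     # Cek master number di tahap awal
--     if total in (11, 22, 33):
--         master = total
--     else:
--         master = None
--         while total > 9:
--             total = sum_digits(str(total))
--
--     judul = {
--         1: "REBIRTH",
--         2: "THE HEART AWAKEN",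
--         3: "THE VOICE RETURNS",
--         4: "THE BREAKTHROUGH",
--         5: "DESTINY ACCELERATION",
--         6: "THE HEART SHIFT",
--         7: "THE AWAKENING",
--         8: "THE POWER YEAR",
--         9: "THE COMPLETION",
--         11: "THE CALLING",
--         22: "THE MASTER BUILDER",
--         33: "THE MASTER TEACHER"
--     }
--
--     if master:
--         return f"Master Number {master} : {judul[master]}"
--     else:
--         return f"Life Path {total} : {judul[total]}"
-- ===== SOURCE B (Python) =====
-- def get_life_path(tgl: int, bln: int, thn: int) -> str:
--     def digit_sum(n: int) -> int:
--         s = 0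
--         while n:
--             s += n % 10
--             n //= 10
--         return s
--
--     # Zero-padding in A's f-string only adds '0' characters, so the digit sum
--     # of the padded date string equals the sum of the three digit sums.
--     total = digit_sum(tgl) + digit_sum(bln) + digit_sum(thn)
--
--     judul = {
--         1: "REBIRTH",
--         2: "THE HEART AWAKEN",
--         3: "THE VOICE RETURNS",
--         4: "THE BREAKTHROUGH",
--         5: "DESTINY ACCELERATION",
--         6: "THE HEART SHIFT",
--         7: "THE AWAKENING",
--         8: "THE POWER YEAR",
--         9: "THE COMPLETION",
--         11: "THE CALLING",
--         22: "THE MASTER BUILDER",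
--         33: "THE MASTER TEACHER"
--     }
--
--     if total in (11, 22, 33):
--         return f"Master Number {total} : {judul[total]}"
--     dr = 0 if total == 0 else 1 + (total - 1) % 9
--     return f"Life Path {dr} : {judul[dr]}"
-- ===== Notes on version B (the rewrite author's own statement) =====
-- stated objective: alternative
-- what changed: B drops the f-string/str() digit pipeline entirely: it sums digits arithmetically with %10 and //10 and replaces A's repeated digit-sum while-loop by the closed-form digital root 1+(total-1)%9.
import Mathlib
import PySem

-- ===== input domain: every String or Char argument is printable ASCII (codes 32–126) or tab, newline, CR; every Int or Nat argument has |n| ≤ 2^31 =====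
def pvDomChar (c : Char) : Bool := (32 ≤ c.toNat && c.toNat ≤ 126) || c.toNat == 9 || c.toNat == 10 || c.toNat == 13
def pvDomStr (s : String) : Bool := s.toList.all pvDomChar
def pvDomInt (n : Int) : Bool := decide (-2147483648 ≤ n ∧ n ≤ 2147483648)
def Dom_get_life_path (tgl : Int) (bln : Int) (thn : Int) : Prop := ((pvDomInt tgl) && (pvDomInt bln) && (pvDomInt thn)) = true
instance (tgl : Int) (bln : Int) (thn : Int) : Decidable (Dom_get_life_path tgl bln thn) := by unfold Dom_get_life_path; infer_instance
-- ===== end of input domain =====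

-- B replaces A's f-string/str() digit pipeline by arithmetic digit sums (%10, //10) and the
-- closed-form digital root 1+(total-1)%9 in place of the repeated digit-sum while-loop (alternative).


-- ===== PORT A =====
-- sum(int(c) for c in s), on the List Char side; int(c) = c.toNat - 48 is exact when every
-- character is a decimal digit, which holds on every input Pre_ admits (nonnegative numbers).
def pvCharSum (cs : List Char) : Int := (cs.map (fun c => (c.toNat : Int) - 48)).sum

-- f"{n:0wd}": zero-pad str(n) to width w; exact for n ≥ 0 (Pre_) — for negative n Python
-- places the '-' before the padding (A raises ValueError on such inputs anyway).
def pvPad (n : Int) (w : Nat) : List Char :=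
  let cs := PySem.Int.toChars n
  List.replicate (w - cs.length) '0' ++ cs

-- the judul dict, shared verbatim by both Pythons
def pvJudul : PySem.Dict Int String := PySem.Dict.ofList
  [(1, "REBIRTH"), (2, "THE HEART AWAKEN"), (3, "THE VOICE RETURNS"), (4, "THE BREAKTHROUGH"),
   (5, "DESTINY ACCELERATION"), (6, "THE HEART SHIFT"), (7, "THE AWAKENING"), (8, "THE POWER YEAR"),
   (9, "THE COMPLETION"), (11, "THE CALLING"), (22, "THE MASTER BUILDER"), (33, "THE MASTER TEACHER")]

-- A's 'while total > 9: total = sum_digits(str(total))'; fuel total.toNat suffices because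
-- the digit sum strictly decreases (proved in pvReduceA_closed below).
def pvReduceA (fuel : Nat) (total : Int) : Int :=
  match fuel with
  | 0 => total
  | f + 1 => if 9 < total then pvReduceA f (pvCharSum (PySem.Int.toChars total)) else total

-- judul[k]: getD "" is exact whenever the key is present (KeyError inputs are outside Pre_).
def pvLookup (k : Int) : String := (PySem.Dict.get? pvJudul k).getD ""

def get_life_path (tgl : Int) (bln : Int) (thn : Int) : String :=
  let raw := pvPad tgl 2 ++ pvPad bln 2 ++ pvPad thn 4
  let total := pvCharSum raw
  if total = 11 ∨ total = 22 ∨ total = 33 then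
    "Master Number " ++ PySem.Int.toStr total ++ " : " ++ pvLookup total
  else
    let t := pvReduceA total.toNat total
    "Life Path " ++ PySem.Int.toStr t ++ " : " ++ pvLookup t

-- ===== PORT B =====
-- 'while n: s += n % 10; n //= 10'; fuel n.natAbs suffices for n ≥ 0 (n has ≤ n digits).
def pvDsLoop (fuel : Nat) (s : Int) (n : Int) : Int :=
  match fuel with
  | 0 => s
  | f + 1 => if n = 0 then s else pvDsLoop f (s + PySem.Int.mod n 10) (PySem.Int.floordiv n 10)

def pvDs (n : Int) : Int := pvDsLoop n.natAbs 0 n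

def get_life_path_alt (tgl : Int) (bln : Int) (thn : Int) : String :=
  let total := pvDs tgl + pvDs bln + pvDs thn
  if total = 11 ∨ total = 22 ∨ total = 33 then
    "Master Number " ++ PySem.Int.toStr total ++ " : " ++ pvLookup total
  else
    let dr := if total = 0 then 0 else 1 + PySem.Int.mod (total - 1) 9
    "Life Path " ++ PySem.Int.toStr dr ++ " : " ++ pvLookup dr

-- ===== PRECONDITION & SPEC =====
-- Pre_ excludes exactly the inputs where the Python A raises: any negative argument
-- (int('-') raises ValueError) and tgl = bln = thn = 0 (the digit reduction yields 0 and
-- judul[0] raises KeyError).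
def Pre_get_life_path (tgl : Int) (bln : Int) (thn : Int) : Prop :=
  0 ≤ tgl ∧ 0 ≤ bln ∧ 0 ≤ thn ∧ ¬(tgl = 0 ∧ bln = 0 ∧ thn = 0)
instance (tgl : Int) (bln : Int) (thn : Int) : Decidable (Pre_get_life_path tgl bln thn) := by
  unfold Pre_get_life_path; infer_instance

def pvWitness_get_life_path : Int × Int × Int := (14, 2, 1999)

def Spec_get_life_path (tgl : Int) (bln : Int) (thn : Int) (out : String) : Prop :=
  out = get_life_path_alt tgl bln thn
instance (tgl : Int) (bln : Int) (thn : Int) (out : String) : Decidable (Spec_get_life_path tgl bln thn out) := by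
  unfold Spec_get_life_path; infer_instance

-- ===== CLAIM (what is proved, stated in full; the proofs are below) =====
def Claim_equal_get_life_path : Prop := ∀ (tgl : Int) (bln : Int) (thn : Int), Dom_get_life_path tgl bln thn → Pre_get_life_path tgl bln thn → Spec_get_life_path tgl bln thn (get_life_path tgl bln thn)

-- ===== LEMMAS AND PROOFS =====

-- arithmetic digit sum on Nat (proof-side reference function)
def pvDsNat : Nat → Nat
  | 0 => 0
  | n + 1 => (n + 1) % 10 + pvDsNat ((n + 1) / 10)
  decreasing_by exact Nat.div_lt_self (Nat.succ_pos n) (by norm_num)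

theorem pvDsNat_eq (n : Nat) : pvDsNat n = if n = 0 then 0 else n % 10 + pvDsNat (n / 10) := by
  cases n with
  | zero => simp [pvDsNat]
  | succ m => simp [pvDsNat]

theorem pvDigitChar_val (m : Nat) (h : m < 10) :
    ((Nat.digitChar m).toNat : Int) - 48 = (m : Int) := by
  interval_cases m <;> decide

theorem pvCharSum_append (a b : List Char) : pvCharSum (a ++ b) = pvCharSum a + pvCharSum b := by
  simp [pvCharSum]

theorem pvCharSum_toDigitsCore (f : Nat) : ∀ (n : Nat) (acc : List Char), n < 10 ^ f →
    pvCharSum (Nat.toDigitsCore 10 f n acc) = (pvDsNat n : Int) + pvCharSum acc := by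
  induction f with
  | zero =>
    intro n acc h
    have : n = 0 := by omega
    subst this
    simp [Nat.toDigitsCore, pvDsNat]
  | succ f ih =>
    intro n acc h
    rw [Nat.toDigitsCore]
    by_cases h0 : n / 10 = 0
    · simp only [h0, if_true]
      have hm : n % 10 < 10 := Nat.mod_lt n (by omega)
      simp only [pvCharSum, List.map_cons, List.sum_cons] at *
      rw [pvDsNat_eq n, h0]
      have := pvDigitChar_val (n % 10) hm
      by_cases hn : n = 0
      · subst hn; simp_all
      · simp only [hn, if_false]
        rw [pvDsNat_eq 0]
        push_cast
        omega
    · simp only [h0, if_false]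
      have hlt : n / 10 < 10 ^ f := Nat.div_lt_of_lt_mul (by rw [Nat.pow_succ] at h; omega)
      rw [ih (n / 10) _ hlt]
      have hm : n % 10 < 10 := Nat.mod_lt n (by omega)
      have := pvDigitChar_val (n % 10) hm
      simp only [pvCharSum, List.map_cons, List.sum_cons]
      rw [pvDsNat_eq n]
      have hn : n ≠ 0 := by omega
      simp only [hn, if_false]
      push_cast
      omega

theorem pvCharSum_toChars (n : Int) (h : 0 ≤ n) :
    pvCharSum (PySem.Int.toChars n) = (pvDsNat n.toNat : Int) := by
  have hneg : ¬ n < 0 := by omega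
  rw [PySem.Int.toChars]
  simp only [hneg, if_false]
  rw [Nat.toDigits]
  have hlt : n.toNat < 10 ^ (n.toNat + 1) := by
    calc n.toNat < 10 ^ n.toNat := Nat.lt_pow_self (by norm_num)
    _ ≤ 10 ^ (n.toNat + 1) := Nat.pow_le_pow_right (by norm_num) (by omega)
  rw [pvCharSum_toDigitsCore (n.toNat + 1) n.toNat [] hlt]
  simp [pvCharSum]

theorem pvCharSum_pad (n : Int) (w : Nat) (h : 0 ≤ n) :
    pvCharSum (pvPad n w) = (pvDsNat n.toNat : Int) := by
  rw [pvPad]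
  rw [pvCharSum_append]
  rw [pvCharSum_toChars n h]
  simp [pvCharSum, List.map_replicate, List.sum_replicate]

theorem pvDsLoop_eq (f : Nat) : ∀ (n : Int) (s : Int), 0 ≤ n → n.toNat < 10 ^ f →
    pvDsLoop f s n = s + (pvDsNat n.toNat : Int) := by
  induction f with
  | zero =>
    intro n s h hf
    have : n = 0 := by omega
    subst this
    simp [pvDsLoop, pvDsNat]
  | succ f ih =>
    intro n s h hf
    rw [pvDsLoop]
    by_cases h0 : n = 0
    · subst h0; simp [pvDsNat]
    · simp only [h0, if_false]
      have hmod : PySem.Int.mod n 10 = n % 10 := PySem.Int.mod_eq_emod_of_pos (by norm_num)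
      have hdiv : PySem.Int.floordiv n 10 = n / 10 := PySem.Int.floordiv_eq_ediv_of_pos (by norm_num)
      rw [hmod, hdiv]
      have hd : 0 ≤ n / 10 := by positivity
      have htn : (n / 10).toNat = n.toNat / 10 := by omega
      have hlt : (n / 10).toNat < 10 ^ f := by
        rw [htn]
        have := Nat.pow_succ 10 f
        omega
      rw [ih (n / 10) (s + n % 10) hd hlt]
      rw [htn, pvDsNat_eq n.toNat]
      have hn0 : n.toNat ≠ 0 := by omega
      simp only [hn0, if_false]
      push_cast
      omega

theorem pvDs_eq (n : Int) (h : 0 ≤ n) : pvDs n = (pvDsNat n.toNat : Int) := by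
  rw [pvDs]
  have hna : n.natAbs = n.toNat := by omega
  rw [hna]
  rw [pvDsLoop_eq n.toNat n 0 h (Nat.lt_pow_self (by norm_num))]
  simp

theorem pvDsNat_le (m : Nat) : pvDsNat m ≤ m := by
  induction m using Nat.strong_induction_on with
  | _ m ih =>
    rw [pvDsNat_eq m]
    by_cases h : m = 0
    · simp [h]
    · simp only [h, if_false]
      have := ih (m / 10) (Nat.div_lt_self (by omega) (by norm_num))
      omega

theorem pvDsNat_lt (m : Nat) (h : 9 < m) : pvDsNat m < m := by
  rw [pvDsNat_eq m]
  have h0 : m ≠ 0 := by omega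
  simp only [h0, if_false]
  have := pvDsNat_le (m / 10)
  omega

theorem pvDsNat_pos (m : Nat) (h : 1 ≤ m) : 1 ≤ pvDsNat m := by
  induction m using Nat.strong_induction_on with
  | _ m ih =>
    rw [pvDsNat_eq m]
    have h0 : m ≠ 0 := by omega
    simp only [h0, if_false]
    by_cases hr : m % 10 = 0
    · have hq : 1 ≤ m / 10 := by omega
      have := ih (m / 10) (Nat.div_lt_self (by omega) (by norm_num)) hq
      omega
    · omega

theorem pvDsNat_mod9 (m : Nat) : pvDsNat m % 9 = m % 9 := by
  induction m using Nat.strong_induction_on with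
  | _ m ih =>
    rw [pvDsNat_eq m]
    by_cases h : m = 0
    · simp [h]
    · simp only [h, if_false]
      have := ih (m / 10) (Nat.div_lt_self (by omega) (by norm_num))
      omega

-- the while-loop computes the closed-form digital root
theorem pvReduceA_closed (f : Nat) : ∀ (t : Int), 1 ≤ t → t.toNat ≤ f →
    pvReduceA f t = 1 + PySem.Int.mod (t - 1) 9 := by
  induction f with
  | zero => intro t h hf; omega
  | succ f ih =>
    intro t h hf
    rw [pvReduceA]
    have hmod : PySem.Int.mod (t - 1) 9 = (t - 1) % 9 := PySem.Int.mod_eq_emod_of_pos (by norm_num)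
    by_cases h9 : 9 < t
    · simp only [h9, if_true]
      rw [pvCharSum_toChars t (by omega)]
      set m := t.toNat with hm
      have hds1 : 1 ≤ pvDsNat m := pvDsNat_pos m (by omega)
      have hdslt : pvDsNat m < m := pvDsNat_lt m (by omega)
      have h1 : (1 : Int) ≤ (pvDsNat m : Int) := by exact_mod_cast hds1
      have h2 : (pvDsNat m : Int).toNat ≤ f := by omega
      rw [ih (pvDsNat m : Int) h1 h2]
      have hmod2 : PySem.Int.mod ((pvDsNat m : Int) - 1) 9 = ((pvDsNat m : Int) - 1) % 9 :=
        PySem.Int.mod_eq_emod_of_pos (by norm_num)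
      rw [hmod, hmod2]
      have h9m : pvDsNat m % 9 = m % 9 := pvDsNat_mod9 m
      have htm : t = (m : Int) := by omega
      rw [htm]
      omega
    · simp only [h9, if_false]
      rw [hmod]
      omega

-- ===== VERDICT (by name: the statement is the Claim_ definition above) =====
theorem get_life_path_spec : Claim_equal_get_life_path := by
  intro tgl bln thn _ hpre
  obtain ⟨h1, h2, h3, _⟩ := hpre
  unfold Spec_get_life_path get_life_path get_life_path_alt
  have htot : pvCharSum (pvPad tgl 2 ++ pvPad bln 2 ++ pvPad thn 4)
      = pvDs tgl + pvDs bln + pvDs thn := by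
    rw [pvCharSum_append, pvCharSum_append]
    rw [pvCharSum_pad tgl 2 h1, pvCharSum_pad bln 2 h2, pvCharSum_pad thn 4 h3]
    rw [pvDs_eq tgl h1, pvDs_eq bln h2, pvDs_eq thn h3]
  simp only [htot]
  set total := pvDs tgl + pvDs bln + pvDs thn with htdef
  by_cases hmaster : total = 11 ∨ total = 22 ∨ total = 33
  · simp only [hmaster, if_true]
  · simp only [hmaster, if_false]
    have htnn : 0 ≤ total := by
      have a1 := pvDs_eq tgl h1; have a2 := pvDs_eq bln h2; have a3 := pvDs_eq thn h3
      have := Int.natCast_nonneg (pvDsNat tgl.toNat)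
      have := Int.natCast_nonneg (pvDsNat bln.toNat)
      have := Int.natCast_nonneg (pvDsNat thn.toNat)
      omega
    by_cases h0 : total = 0
    · simp only [h0]
      norm_num [pvReduceA]
    · have h1t : 1 ≤ total := by omega
      rw [pvReduceA_closed total.toNat total h1t (le_refl _)]
      simp only [h0, if_false]
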